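-- pv_equiv track=rewrite | github.com/AJMSD/kubera | src/kubera/features/news_features.py | resolve_supported_prediction_modes
-- ===== SOURCE A (Python) =====
-- SUPPORTED_NEWS_PREDICTION_MODES = ("pre_market", "after_close")
--
-- def resolve_supported_prediction_modes(raw_modes: tuple[str, ...]) -> tuple[str, ...]:
--     """Expand configured prediction modes into concrete Stage 7 row modes."""
--
--     ordered_modes: list[str] = []
--     for mode in raw_modes:
--         if mode == "both":
--             for concrete_mode in SUPPORTED_NEWS_PREDICTION_MODES:
--                 if concrete_mode not in ordered_modes:
--                     ordered_modes.append(concrete_mode)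
--             continue
--         if mode in SUPPORTED_NEWS_PREDICTION_MODES and mode not in ordered_modes:
--             ordered_modes.append(mode)
--     return tuple(ordered_modes)
-- ===== SOURCE B (Python) =====
-- SUPPORTED_NEWS_PREDICTION_MODES = ("pre_market", "after_close")
--
-- def resolve_supported_prediction_modes(raw_modes):
--     """Expand configured prediction modes into concrete Stage 7 row modes."""
--     expanded = []
--     for mode in raw_modes:
--         if mode == "both":
--             expanded.extend(SUPPORTED_NEWS_PREDICTION_MODES)
--         else:
--             expanded.append(mode)
--     return tuple(dict.fromkeys(m for m in expanded if m in SUPPORTED_NEWS_PREDICTION_MODES))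
-- ===== Notes on version B (the rewrite author's own statement) =====
-- stated objective: idiomatic
-- what changed: A interleaves expansion, support-filtering and dedup in one stateful loop with 'not in' scans; B first builds the flat expanded token list, then filters to supported modes and deduplicates in one idiomatic dict.fromkeys pass.
import Mathlib
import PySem

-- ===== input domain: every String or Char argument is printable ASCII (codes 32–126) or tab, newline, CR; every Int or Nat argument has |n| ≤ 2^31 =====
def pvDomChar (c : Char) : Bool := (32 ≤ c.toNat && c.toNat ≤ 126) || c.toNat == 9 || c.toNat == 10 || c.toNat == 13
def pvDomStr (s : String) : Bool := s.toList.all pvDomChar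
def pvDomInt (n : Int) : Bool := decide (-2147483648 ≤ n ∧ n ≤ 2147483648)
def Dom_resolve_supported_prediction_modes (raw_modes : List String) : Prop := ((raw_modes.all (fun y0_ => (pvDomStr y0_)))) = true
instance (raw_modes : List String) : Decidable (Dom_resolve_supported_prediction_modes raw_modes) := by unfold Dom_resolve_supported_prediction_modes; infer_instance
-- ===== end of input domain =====

-- B separates expansion from filtering/dedup (dict.fromkeys) instead of A's interleaved stateful loop; same cost, more idiomatic.

-- SUPPORTED_NEWS_PREDICTION_MODES (module-level constant, shared by both programs)
def pvSupported : List String := ["pre_market", "after_close"]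

-- ===== PORT A =====
def resolve_supported_prediction_modes (raw_modes : List String) : List String :=
  raw_modes.foldl (fun ordered_modes mode =>
    if mode = "both" then
      pvSupported.foldl (fun os c => if c ∉ os then os ++ [c] else os) ordered_modes
    else if mode ∈ pvSupported ∧ mode ∉ ordered_modes then ordered_modes ++ [mode]
    else ordered_modes) []

-- ===== PORT B =====
def resolve_supported_prediction_modes_alt (raw_modes : List String) : List String :=
  let expanded := raw_modes.foldl (fun acc mode =>
    if mode = "both" then acc ++ pvSupported else acc ++ [mode]) []
  PySem.List.dedup (expanded.filter (fun m => decide (m ∈ pvSupported)))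

-- ===== PRECONDITION & SPEC =====
def Spec_resolve_supported_prediction_modes (raw_modes : List String) (out : List String) : Prop := out = resolve_supported_prediction_modes_alt raw_modes
instance (raw_modes : List String) (out : List String) : Decidable (Spec_resolve_supported_prediction_modes raw_modes out) := by unfold Spec_resolve_supported_prediction_modes; infer_instance

-- ===== CLAIM (what is proved, stated in full; the proofs are below) =====
def Claim_equal_resolve_supported_prediction_modes : Prop := ∀ (raw_modes : List String), Dom_resolve_supported_prediction_modes raw_modes → Spec_resolve_supported_prediction_modes raw_modes (resolve_supported_prediction_modes raw_modes)

-- ===== LEMMAS AND PROOFS =====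

-- the per-token contribution to the expanded list
def pvExpand (m : String) : List String := if m = "both" then pvSupported else [m]

theorem pv_add_eq (os : List String) (c : String) :
    (if c ∉ os then os ++ [c] else os) = PySem.Set.add os c := by
  by_cases h : c ∈ os <;> simp [PySem.Set.add, PySem.Set.contains, h]

theorem pv_foldl_congr {α β : Type} {f g : β → α → β} (l : List α) (b : β)
    (h : ∀ b a, f b a = g b a) : l.foldl f b = l.foldl g b := by
  induction l generalizing b with
  | nil => rfl
  | cons x xs ih => simp only [List.foldl_cons, h, ih]

theorem pv_step_eq (os : List String) (m : String) :
    (if m = "both" then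
      pvSupported.foldl (fun os c => if c ∉ os then os ++ [c] else os) os
    else if m ∈ pvSupported ∧ m ∉ os then os ++ [m]
    else os)
    = PySem.Set.update os ((pvExpand m).filter (fun x => decide (x ∈ pvSupported))) := by
  by_cases hb : m = "both"
  · subst hb
    have : (pvExpand "both").filter (fun x => decide (x ∈ pvSupported)) = pvSupported := by decide
    rw [this]
    simp only [PySem.Set.update]
    exact pv_foldl_congr _ _ (fun os c => pv_add_eq os c)
  · by_cases hm : m ∈ pvSupported
    · have : (pvExpand m).filter (fun x => decide (x ∈ pvSupported)) = [m] := by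
        simp [pvExpand, hb, hm]
      rw [this]
      simp only [if_neg hb, PySem.Set.update, List.foldl_cons, List.foldl_nil]
      rw [← pv_add_eq]
      by_cases h : m ∈ os <;> simp [h, hm]
    · have : (pvExpand m).filter (fun x => decide (x ∈ pvSupported)) = [] := by
        simp [pvExpand, hb, hm]
      rw [this]
      simp [hb, hm, PySem.Set.update]

theorem pv_main (modes : List String) (os : List String) :
    modes.foldl (fun ordered_modes mode =>
      if mode = "both" then
        pvSupported.foldl (fun os c => if c ∉ os then os ++ [c] else os) ordered_modes
      else if mode ∈ pvSupported ∧ mode ∉ ordered_modes then ordered_modes ++ [mode]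
      else ordered_modes) os
    = PySem.Set.update os ((modes.flatMap pvExpand).filter (fun x => decide (x ∈ pvSupported))) := by
  induction modes generalizing os with
  | nil => simp [PySem.Set.update]
  | cons m rest ih =>
    simp only [List.foldl_cons, List.flatMap_cons, List.filter_append, PySem.Set.update,
      List.foldl_append]
    rw [ih, pv_step_eq os m]
    rfl

theorem pv_expanded_eq (modes : List String) :
    modes.foldl (fun acc mode => if mode = "both" then acc ++ pvSupported else acc ++ [mode]) []
    = modes.flatMap pvExpand := by
  have := PySem.List.foldl_append_eq_flatMap (g := pvExpand) (l := modes) (acc := ([] : List String))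
  simp only [List.nil_append] at this
  rw [← this]
  exact pv_foldl_congr _ _ (fun acc m => by by_cases h : m = "both" <;> simp [pvExpand, h])

-- ===== VERDICT (by name: the statement is the Claim_ definition above) =====
theorem resolve_supported_prediction_modes_spec : Claim_equal_resolve_supported_prediction_modes := by
  intro raw_modes _
  unfold Spec_resolve_supported_prediction_modes resolve_supported_prediction_modes
    resolve_supported_prediction_modes_alt
  rw [pv_main, pv_expanded_eq]
  rw [PySem.List.dedup_eq_ofList]
  rfl
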